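-- pv_equiv track=rewrite | github.com/juliema/label_reconciliations | reconcile.py | reconcile_select
-- ===== SOURCE A (Python) =====
-- from functools import reduce
-- from collections import Counter, namedtuple
--
-- PLACE_HOLDERS = ['placeholder']  # Replace these placeholders with an empty string
--
-- SEPARATOR = ':'                  # Used to separate match flags from values
--
-- ExactScore = namedtuple('ExactScore', 'value count')
--
-- def explain_values(values, filled):
--     record_count = len(values)
--     blank_count = record_count - reduce((lambda x, y: x + y.count), filled, 0)
--     return record_count, blank_count
--
-- TOTAL_PLURALS = {'records': 'records', 'All': 'All', 'are': 'are'}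
--
-- TOTAL_SINGULARS = {'records': 'record', 'All': 'The', 'are': 'is'}
--
-- BLANK_PLURALS = {'blanks': 'blanks'}
--
-- BLANK_SINGULARS = {'blanks': 'blank'}
--
-- def format_explanation(form, value='', record_count=None, blank_count=None,
--                        match_count=None, match_type=None, score=None):
--     form += '{separator}{value}'
--     std_words = dict(value=value, separator=SEPARATOR, record_count=record_count, blank_count=blank_count,
--                      match_count=match_count, match_type=match_type, score=score)
--     total_words = TOTAL_SINGULARS.copy() if record_count == 1 else TOTAL_PLURALS.copy()
--     blank_words = BLANK_SINGULARS.copy() if blank_count == 1 else BLANK_PLURALS.copy()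
--     words = dict(list(total_words.items()) + list(blank_words.items()) + list(std_words.items()))
--     return form.format(**words)
--
-- def explain_all_blank(values):
--     record_count = len(values)
--     return format_explanation('{All} {record_count} {records} {are} blank', record_count=record_count)
--
-- def explain_one_transcript(value, values, filled):
--     record_count, blank_count = explain_values(values, filled)
--     form = 'Only 1 transcript in {record_count} {records}'
--     return format_explanation(form, value=value, record_count=record_count)
--
-- def explain_no_match(values, filled, match_type):
--     record_count, blank_count = explain_values(values, filled)
--     form = 'No {match_type} match on {record_count} {records} with {blank_count} {blanks}'
--     return format_explanation(form, record_count=record_count, blank_count=blank_count, match_type=match_type)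
--
-- def explain_exact_match(value, values, filled, match_type):
--     record_count, blank_count = explain_values(values, filled)
--     form = '{match_type} match, {match_count} of {record_count} {records} with {blank_count} {blanks}'
--     return format_explanation(form, value=value, record_count=record_count, match_count=filled[0].count,
--                               blank_count=blank_count, match_type=match_type)
--
-- def only_filled_values(values):
--     return [ExactScore(c[0], c[1]) for c in Counter([v for v in values if v]).most_common()]
--
-- def reconcile_select(group):
--     values = [str(g) if str(g).lower() not in PLACE_HOLDERS else '' for g in group]
--     filled = only_filled_values(values)
--
--     if not filled:
--         return explain_all_blank(values)
--
--     if filled[0].count > 1: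
--         return explain_exact_match(filled[0].value, values, filled, 'Exact')
--
--     if len(filled) == 1:
--         return explain_one_transcript(filled[0].value, values, filled)
--
--     return explain_no_match(values, filled, 'select')
-- ===== SOURCE B (Python) =====
-- def reconcile_select(group):
--     # Brute-force: no Counter/dict at all; per-value counts via list.count,
--     # mode = first value whose count strictly exceeds the best so far.
--     values = ['' if str(g).lower() == 'placeholder' else str(g) for g in group]
--     filled = [v for v in values if v]
--     n = len(values)
--     recs = 'record' if n == 1 else 'records'
--     if not filled:
--         art = 'The' if n == 1 else 'All'
--         are = 'is' if n == 1 else 'are'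
--         return f'{art} {n} {recs} {are} blank:'
--     best, maxc = '', 0
--     for v in filled:
--         c = filled.count(v)
--         if maxc < c:
--             best, maxc = v, c
--     b = n - len(filled)
--     blanks = 'blank' if b == 1 else 'blanks'
--     if maxc > 1:
--         return f'Exact match, {maxc} of {n} {recs} with {b} {blanks}:{best}'
--     if len(filled) == 1:
--         return f'Only 1 transcript in {n} {recs}:{best}'
--     return f'No select match on {n} {recs} with {b} {blanks}:'
-- ===== Notes on version B (the rewrite author's own statement) =====
-- stated objective: alternative
-- what changed: B builds no Counter/dict and does no most_common sort at all: it keeps the raw filled list and brute-forces each value's frequency with list.count inside a single first-strict-max scan (which inherently picks the earliest-occurring mode, matching most_common's insertion-order tie-break), and since a max count of 1 forces all filled values distinct, A's distinct-count==1 test becomes a plain len(filled)==1.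
import Mathlib
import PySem

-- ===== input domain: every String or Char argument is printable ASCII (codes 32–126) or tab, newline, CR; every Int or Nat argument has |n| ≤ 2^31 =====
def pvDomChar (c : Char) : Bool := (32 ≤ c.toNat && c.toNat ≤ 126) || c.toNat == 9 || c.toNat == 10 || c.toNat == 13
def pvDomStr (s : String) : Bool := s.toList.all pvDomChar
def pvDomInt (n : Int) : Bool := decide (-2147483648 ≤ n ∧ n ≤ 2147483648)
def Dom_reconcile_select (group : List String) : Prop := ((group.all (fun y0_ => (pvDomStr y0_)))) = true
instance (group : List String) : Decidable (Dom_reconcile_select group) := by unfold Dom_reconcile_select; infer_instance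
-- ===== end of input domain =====

-- B drops Counter/most_common entirely: brute-force per-value count scans over the filled list with a first-strict-max pick; same strings, same results.


-- ===== PORT A =====
-- PLACE_HOLDERS = ['placeholder']
def pvA_PLACE_HOLDERS : List String := ["placeholder"]

-- explain_values: (record_count, blank_count); blank_count = len - reduce(+count, filled, 0)
def pvA_explain_values (values : List String) (filled : List (String × Int)) : Int × Int :=
  let record_count : Int := values.length
  let blank_count : Int := record_count - filled.foldl (fun x y => x + y.2) 0
  (record_count, blank_count)

-- the word tables of format_explanation, resolved per count (TOTAL_SINGULARS/PLURALS, BLANK_*)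
def pvA_wordAll (record_count : Int) : String := if record_count = 1 then "The" else "All"
def pvA_wordRecords (record_count : Int) : String := if record_count = 1 then "record" else "records"
def pvA_wordAre (record_count : Int) : String := if record_count = 1 then "is" else "are"
def pvA_wordBlanks (blank_count : Int) : String := if blank_count = 1 then "blank" else "blanks"

-- explain_all_blank: '{All} {record_count} {records} {are} blank' + ':{value}' with value=''
def pvA_explain_all_blank (values : List String) : String :=
  let record_count : Int := values.length
  pvA_wordAll record_count ++ " " ++ PySem.Int.toStr record_count ++ " " ++
    pvA_wordRecords record_count ++ " " ++ pvA_wordAre record_count ++ " blank:"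

-- explain_one_transcript: 'Only 1 transcript in {record_count} {records}' + ':{value}'
def pvA_explain_one_transcript (value : String) (values : List String)
    (filled : List (String × Int)) : String :=
  let rb := pvA_explain_values values filled
  "Only 1 transcript in " ++ PySem.Int.toStr rb.1 ++ " " ++ pvA_wordRecords rb.1 ++ ":" ++ value

-- explain_no_match: 'No {match_type} match on {record_count} {records} with {blank_count} {blanks}' + ':'
def pvA_explain_no_match (values : List String) (filled : List (String × Int))
    (match_type : String) : String :=
  let rb := pvA_explain_values values filled
  "No " ++ match_type ++ " match on " ++ PySem.Int.toStr rb.1 ++ " " ++ pvA_wordRecords rb.1 ++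
    " with " ++ PySem.Int.toStr rb.2 ++ " " ++ pvA_wordBlanks rb.2 ++ ":"

-- explain_exact_match: '{match_type} match, {match_count} of {record_count} {records} with {blank_count} {blanks}' + ':{value}'
def pvA_explain_exact_match (value : String) (values : List String)
    (filled : List (String × Int)) (match_type : String) : String :=
  let rb := pvA_explain_values values filled
  let match_count : Int := (filled.headD ("", 0)).2
  match_type ++ " match, " ++ PySem.Int.toStr match_count ++ " of " ++ PySem.Int.toStr rb.1 ++
    " " ++ pvA_wordRecords rb.1 ++ " with " ++ PySem.Int.toStr rb.2 ++ " " ++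
    pvA_wordBlanks rb.2 ++ ":" ++ value

-- only_filled_values: Counter([v for v in values if v]).most_common()
-- (most_common() = sorted(items, key=count, reverse=True), a stable sort)
def pvA_only_filled_values (values : List String) : List (String × Int) :=
  PySem.List.sorted (PySem.Dict.counter (values.filter (fun v => v ≠ ""))).items
    (fun c => c.2) true

def reconcile_select (group : List String) : String :=
  let values := group.map (fun g => if PySem.Str.lower g ∉ pvA_PLACE_HOLDERS then g else "")
  let filled := pvA_only_filled_values values
  match filled with
  | [] => pvA_explain_all_blank values
  | f0 :: _ =>
    if f0.2 > 1 then pvA_explain_exact_match f0.1 values filled "Exact"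
    else if filled.length = 1 then pvA_explain_one_transcript f0.1 values filled
    else pvA_explain_no_match values filled "select"

-- ===== PORT B =====
def reconcile_select_alt (group : List String) : String :=
  let values := group.map (fun g => if PySem.Str.lower g = "placeholder" then "" else g)
  let filled := values.filter (fun v => v ≠ "")
  let n : Int := values.length
  let recs := if n = 1 then "record" else "records"
  if filled = [] then
    (if n = 1 then "The" else "All") ++ " " ++ PySem.Int.toStr n ++ " " ++ recs ++ " " ++
      (if n = 1 then "is" else "are") ++ " blank:"
  else
    -- best, maxc: first value whose count strictly exceeds the best so far
    let bm := filled.foldl (fun bm v =>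
        let c : Int := PySem.List.count filled v
        if bm.2 < c then (v, c) else bm) ("", 0)
    let b := n - (filled.length : Int)
    let blanks := if b = 1 then "blank" else "blanks"
    if bm.2 > 1 then
      "Exact match, " ++ PySem.Int.toStr bm.2 ++ " of " ++ PySem.Int.toStr n ++ " " ++ recs ++
        " with " ++ PySem.Int.toStr b ++ " " ++ blanks ++ ":" ++ bm.1
    else if filled.length = 1 then
      "Only 1 transcript in " ++ PySem.Int.toStr n ++ " " ++ recs ++ ":" ++ bm.1
    else
      "No select match on " ++ PySem.Int.toStr n ++ " " ++ recs ++ " with " ++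
        PySem.Int.toStr b ++ " " ++ blanks ++ ":"

-- ===== PRECONDITION & SPEC =====
def Spec_reconcile_select (group : List String) (out : String) : Prop := out = reconcile_select_alt group
instance (group : List String) (out : String) : Decidable (Spec_reconcile_select group out) := by unfold Spec_reconcile_select; infer_instance

-- ===== CLAIM (what is proved, stated in full; the proofs are below) =====
def Claim_equal_reconcile_select : Prop := ∀ (group : List String), Dom_reconcile_select group → Spec_reconcile_select group (reconcile_select group)

-- ===== LEMMAS AND PROOFS =====

-- A's normalizer (membership in the one-element placeholder list) = B's normalizer
theorem pv_norm_eq :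
    (fun g => if PySem.Str.lower g ∉ pvA_PLACE_HOLDERS then g else "") =
      (fun g => if PySem.Str.lower g = "placeholder" then "" else g) := by
  funext g
  by_cases h : PySem.Str.lower g = "placeholder" <;> simp [pvA_PLACE_HOLDERS, h]

-- the step of a first-strict-max scan keyed by g
def pvStep (g : String → Int) (bm : String × Int) (v : String) : String × Int :=
  if bm.2 < g v then (v, g v) else bm

theorem pvStep_mono (g : String → Int) (z : String × Int) (v : String) :
    z.2 ≤ (pvStep g z v).2 := by
  unfold pvStep
  split
  · next h => exact le_of_lt h
  · exact le_refl _

theorem pvStep_skip (g : String → Int) (z : String × Int) (v : String) (h : g v ≤ z.2) :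
    pvStep g z v = z := by
  unfold pvStep; rw [if_neg]; omega

theorem pvStep_ge (g : String → Int) (z : String × Int) (v : String) :
    g v ≤ (pvStep g z v).2 := by
  unfold pvStep
  split
  · exact le_refl _
  · next h => omega

theorem pvFold_mono (g : String → Int) (l : List String) (z : String × Int) :
    z.2 ≤ (l.foldl (pvStep g) z).2 := by
  induction l generalizing z with
  | nil => exact le_refl _
  | cons x xs ih => exact le_trans (pvStep_mono g z x) (ih (pvStep g z x))

theorem pvFold_bound (g : String → Int) (l : List String) (z : String × Int)
    (v : String) : v ∈ l → g v ≤ (l.foldl (pvStep g) z).2 := by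
  induction l generalizing z with
  | nil => intro hv; simp at hv
  | cons x xs ih =>
    intro hv
    rcases List.mem_cons.1 hv with hv | hv
    · subst hv
      exact le_trans (pvStep_ge g z v) (pvFold_mono g xs (pvStep g z v))
    · exact ih (pvStep g z x) hv

-- once the accumulator dominates g x, every occurrence of x is a no-op
theorem pvFold_filter (g : String → Int) (x : String) (l : List String) (z : String × Int)
    (h : g x ≤ z.2) :
    l.foldl (pvStep g) z = (l.filter (fun y => !(y == x))).foldl (pvStep g) z := by
  induction l generalizing z with
  | nil => simp
  | cons y ys ih =>
    rw [List.foldl_cons, List.filter_cons]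
    by_cases hy : y = x
    · subst hy
      rw [pvStep_skip g z y h]
      simpa using ih z h
    · simpa [hy] using ih (pvStep g z y) (le_trans h (pvStep_mono g z y))

-- a first-strict-max scan sees only the FIRST occurrence of each value:
-- folding over the list = folding over its set of distinct values (first occurrences, in order)
theorem pvFold_ofList (g : String → Int) (l : List String) (z : String × Int) :
    l.foldl (pvStep g) z = (PySem.Set.ofList l).foldl (pvStep g) z := by
  induction l generalizing z with
  | nil => simp
  | cons x xs ih =>
    rw [PySem.Set.ofList_cons, List.foldl_cons, List.foldl_cons]
    rw [ih (pvStep g z x),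
      pvFold_filter g x (PySem.Set.ofList xs) (pvStep g z x) (pvStep_ge g z x)]
    rfl

-- head of a foldl of stable inserts = first strict-max scan (the head only depends on the old head)
theorem pv_headD_foldl_insertBy {a : Type} (z : a × Int) :
    ∀ (l : List (a × Int)) (h : a × Int) (t : List (a × Int)),
      (l.foldl (fun acc x => PySem.List.insertBy (fun p q => decide (q.2 < p.2)) x acc) (h :: t)).headD z
        = l.foldl (fun bm p => if bm.2 < p.2 then p else bm) h := by
  intro l
  induction l with
  | nil => intro h t; simp
  | cons x l ih =>
    intro h t
    simp only [List.foldl_cons, PySem.List.insertBy]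
    by_cases hx : h.2 < x.2
    · simp only [hx, decide_true, if_true]
      exact ih x (h :: t)
    · simp only [hx, decide_false, if_false]
      exact ih h _

-- head of the stable reverse sort by count = first strict-max scan (counts positive)
theorem head_sorted_rev_scan {a : Type} (l : List (a × Int)) (a0 : a)
    (hpos : ∀ p ∈ l, 0 < p.2) (hne : l ≠ []) :
    (PySem.List.sorted l (fun c => c.2) true).headD (a0, 0) =
      l.foldl (fun bm p => if bm.2 < p.2 then p else bm) (a0, 0) := by
  cases l with
  | nil => exact absurd rfl hne
  | cons p l' =>
    rw [PySem.List.sorted_rev_eq_foldl_insertBy]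
    simp only [List.foldl_cons, PySem.List.insertBy]
    rw [pv_headD_foldl_insertBy]
    have hp : ((a0, (0 : Int)) : a × Int).2 < p.2 := hpos p (List.mem_cons_self ..)
    simp [hp]

-- B's scan over the filled list = the strict-max scan over the counter's items
theorem pvB_scan_eq_items (fl : List String) :
    fl.foldl (fun bm v =>
        let c : Int := PySem.List.count fl v
        if bm.2 < c then (v, c) else bm) ("", 0) =
      (PySem.Dict.counter fl).items.foldl (fun bm p => if bm.2 < p.2 then p else bm) ("", 0) := by
  have hstep : (fun (bm : String × Int) v =>
      let c : Int := PySem.List.count fl v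
      if bm.2 < c then (v, c) else bm) = pvStep (fun v => (PySem.List.count fl v : Int)) := by
    funext bm v; rfl
  rw [hstep, pvFold_ofList, PySem.Dict.items_counter, List.foldl_map]
  refine PySem.List.foldl_congr_mem _ _ _ _ ?_
  intro bm k _
  simp [pvStep, PySem.List.count_eq]

-- sum of the counts in most_common's output = number of filled values
theorem pv_sum_counts (fl : List String) :
    (PySem.List.sorted (PySem.Dict.counter fl).items (fun c => c.2) true).foldl
        (fun x y => x + y.2) 0 = (fl.length : Int) := by
  rw [PySem.List.foldl_add]
  have hperm := (PySem.List.sorted_perm (PySem.Dict.counter fl).items (fun c => c.2) true).map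
    (fun c : String × Int => c.2)
  rw [hperm.sum_eq, PySem.Dict.items_counter]
  have hp : (PySem.Set.ofList fl : List String).Perm fl.dedup := by
    rw [List.perm_ext_iff_of_nodup (PySem.Set.nodup_ofList fl) fl.nodup_dedup]
    intro x
    rw [PySem.Set.mem_ofList, List.mem_dedup]
  have hmap := (hp.map (fun k => (List.count k fl : Int))).sum_eq
  simp only [List.map_map, Function.comp_def]
  rw [hmap]
  have hcast : (fl.dedup.map (fun k => (List.count k fl : Int))) =
      (fl.dedup.map (fun k => List.count k fl)).map (fun n : Nat => (n : Int)) := by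
    simp [List.map_map, Function.comp_def]
  rw [hcast, ← Nat.cast_list_sum, List.sum_map_count_dedup_eq_length]
  simp

-- every count in the counter's items is positive
theorem pv_items_pos (fl : List String) :
    ∀ p ∈ (PySem.Dict.counter fl).items, (0 : Int) < p.2 := by
  intro p hp
  rw [PySem.Dict.items_counter] at hp
  obtain ⟨k, hk, rfl⟩ := List.mem_map.1 hp
  show (0 : Int) < ((List.count k fl : Nat) : Int)
  exact_mod_cast List.count_pos_iff.2 ((PySem.Set.mem_ofList fl k).1 hk)

-- if the maximal count is ≤ 1 the filled list has no duplicates,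
-- so most_common has exactly as many entries as the filled list
theorem pv_items_length_of_max_le_one (fl : List String)
    (h : ∀ v ∈ fl, List.count v fl ≤ 1) :
    (PySem.Dict.counter fl).items.length = fl.length := by
  have hnd : fl.Nodup := List.nodup_iff_count_le_one.2 (by
    intro a
    by_cases ha : a ∈ fl
    · exact h a ha
    · simp [List.count_eq_zero_of_not_mem ha])
  rw [PySem.Dict.items_counter, List.length_map, PySem.Set.ofList_eq_self_of_nodup fl hnd]

theorem reconcile_select_spec : Claim_equal_reconcile_select := by
  intro group _
  show reconcile_select group = reconcile_select_alt group
  simp only [reconcile_select, reconcile_select_alt, ← pv_norm_eq]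
  set vs := group.map (fun g => if PySem.Str.lower g ∉ pvA_PLACE_HOLDERS then g else "") with hvs
  set fl := vs.filter (fun v => v ≠ "") with hfl
  have hlen : vs.length = group.length := by rw [hvs, List.length_map]
  by_cases hfl0 : fl = []
  · -- no filled values
    have hsrt : pvA_only_filled_values vs = [] := by
      rw [pvA_only_filled_values, ← hfl, hfl0]
      rfl
    rw [hsrt, if_pos hfl0]
    simp [pvA_explain_all_blank, pvA_wordAll, pvA_wordRecords, pvA_wordAre, hlen]
  · -- at least one filled value
    have hne : (PySem.Dict.counter fl).items ≠ [] := by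
      rcases List.exists_mem_of_ne_nil fl hfl0 with ⟨v, hv⟩
      rw [PySem.Dict.items_counter]
      intro hcontra
      rw [List.map_eq_nil_iff] at hcontra
      have hv2 : v ∈ PySem.Set.ofList fl := (PySem.Set.mem_ofList fl v).2 hv
      rw [hcontra] at hv2
      simp at hv2
    rcases hs : pvA_only_filled_values vs with _ | ⟨f0, rest⟩
    · rw [pvA_only_filled_values, ← hfl] at hs
      exact absurd ((PySem.List.sorted_eq_nil_iff _ _ _).1 hs) hne
    have hhead : (PySem.Dict.counter fl).items.foldl
        (fun bm p => if bm.2 < p.2 then p else bm) ("", 0) = f0 := by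
      rw [← head_sorted_rev_scan (PySem.Dict.counter fl).items "" (pv_items_pos fl) hne]
      rw [pvA_only_filled_values, ← hfl] at hs
      rw [hs]
      rfl
    have hbm : fl.foldl (fun bm v =>
        let c : Int := PySem.List.count fl v
        if bm.2 < c then (v, c) else bm) ("", 0) = f0 := by
      rw [pvB_scan_eq_items, hhead]
    have hsum : (pvA_only_filled_values vs).foldl (fun x y => x + y.2) 0 = (fl.length : Int) := by
      rw [pvA_only_filled_values, ← hfl]; exact pv_sum_counts fl
    have hlen2 : (pvA_only_filled_values vs).length = (PySem.Dict.counter fl).items.length := by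
      rw [pvA_only_filled_values, ← hfl]; exact PySem.List.length_sorted ..
    rw [hs] at hsum hlen2
    rw [if_neg hfl0]
    dsimp only
    rw [hbm]
    by_cases h1 : f0.2 > 1
    · rw [if_pos h1, if_pos h1]
      simp [pvA_explain_exact_match, pvA_explain_values, pvA_wordRecords, pvA_wordBlanks,
        hsum, hlen]
    · -- maximal count ≤ 1: every filled value occurs once, items and fl have equal length
      have hcle : ∀ v ∈ fl, List.count v fl ≤ 1 := by
        intro v hv
        have hb := pvFold_bound (fun v => (PySem.List.count fl v : Int)) fl ("", 0) v hv
        have heq : fl.foldl (pvStep (fun v => (PySem.List.count fl v : Int))) ("", 0) = f0 := by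
          rw [← hbm]; rfl
        rw [heq] at hb
        have hb2 : ((PySem.List.count fl v : Nat) : Int) ≤ f0.2 := hb
        rw [PySem.List.count_eq] at hb2
        omega
      have hil : (f0 :: rest).length = fl.length := by
        rw [hlen2]; exact pv_items_length_of_max_le_one fl hcle
      rw [if_neg h1, if_neg h1]
      by_cases h2 : fl.length = 1
      · rw [if_pos (by omega : (f0 :: rest).length = 1), if_pos h2]
        simp [pvA_explain_one_transcript, pvA_explain_values, pvA_wordRecords, hlen]
      · rw [if_neg (by omega : ¬ (f0 :: rest).length = 1), if_neg h2]
        simp [pvA_explain_no_match, pvA_explain_values, pvA_wordRecords, pvA_wordBlanks,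
          hsum, hlen]
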